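-- pv_equiv track=rewrite | github.com/HaeKang/2023-coding-study | week7/[PGS] 86971.전력망을 둘로 나누기.LV2/JH.py | search
-- ===== SOURCE A (Python) =====
-- def search(copied):
--     n = len(copied)
--     visited = [0] * n
--
--     ret = -1
--     for i in range(n):
--         if not visited[i]:
--             visited[i] = 1
--             dfs(i, copied, visited)
--             if ret < 0: ret = sum(visited)
--     ret = abs(ret - (n-ret)) # 트리 하나, 나머지 트리 하나
--     return ret
--
-- def dfs(i, copied, visited):
--     for j in range(len(copied)):
--         if copied[i][j] and not visited[j]:
--             visited[j] = 1
--             dfs(j, copied, visited)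
-- ===== SOURCE B (Python) =====
-- def search(copied):
--     n = len(copied)
--     if n == 0:
--         return 0
--     visited = [False] * n
--     visited[0] = True
--     stack = [0]
--     count = 0
--     while stack:
--         i = stack.pop()
--         count += 1
--         for j in range(n):
--             if copied[i][j] and not visited[j]:
--                 visited[j] = True
--                 stack.append(j)
--     return abs(2 * count - n)
-- ===== Notes on version B (the rewrite author's own statement) =====
-- stated objective: simpler
-- what changed: Recursive DFS over all components with a visited array and sum(visited) is replaced by a single iterative stack flood-fill from node 0 that counts nodes as it pops them; the outer for-loop and the sum pass disappear.
-- intended difference: On the empty matrix [] A's loop never runs so the sentinel ret=-1 survives and A returns abs(-1-1)=2; B returns 0, the intended size difference between two empty parts. — e.g. on search([]): A returns 2, B returns 0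
import Mathlib
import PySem

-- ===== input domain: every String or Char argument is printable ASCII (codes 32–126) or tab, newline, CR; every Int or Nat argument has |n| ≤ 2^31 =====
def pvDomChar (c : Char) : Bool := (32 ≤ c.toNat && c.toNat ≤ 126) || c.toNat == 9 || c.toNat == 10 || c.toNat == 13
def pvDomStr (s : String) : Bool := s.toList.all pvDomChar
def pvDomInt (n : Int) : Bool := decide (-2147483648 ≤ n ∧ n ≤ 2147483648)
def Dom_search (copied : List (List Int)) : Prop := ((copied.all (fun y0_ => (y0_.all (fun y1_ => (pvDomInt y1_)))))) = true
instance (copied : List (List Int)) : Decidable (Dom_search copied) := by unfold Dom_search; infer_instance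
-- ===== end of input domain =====

-- B replaces A's recursive DFS over all components plus a sum(visited) pass by a single
-- iterative stack flood-fill from node 0 that counts nodes as it pops them (simpler);
-- on the empty matrix A returns 2 (leftover sentinel), B returns 0 (see D_search).

-- ===== PORT A =====
-- A's recursive dfs; `fuel` is only a totality guard (proved sufficient below: with
-- fuel ≥ the number of unvisited entries it behaves exactly like Python's unbounded
-- recursion). Loop indices are always in range, so the getD defaults are inert inside Pre_search.
def dfsA (copied : List (List Int)) (fuel i j : Nat) (visited : List Int) : List Int :=
  if h : j < copied.length then
    if ((copied.getD i []).getD j 0 ≠ 0 ∧ visited.getD j 0 = 0) then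
      match fuel with
      | 0 => visited
      | f+1 => dfsA copied f i (j+1) (dfsA copied f j 0 (visited.set j 1))
    else
      dfsA copied fuel i (j+1) visited
  else visited
  termination_by (fuel, copied.length - j)
  decreasing_by
  · exact Prod.Lex.left _ _ (Nat.lt_succ_self _)
  · exact Prod.Lex.left _ _ (Nat.lt_succ_self _)
  · exact Prod.Lex.right _ (by omega)

def search (copied : List (List Int)) : Int :=
  let n := copied.length
  let res := (List.range n).foldl (fun (st : List Int × Int) i =>
    if st.1.getD i 0 = 0 then
      let visited := dfsA copied n i 0 (st.1.set i 1)
      (visited, if st.2 < 0 then visited.sum else st.2)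
    else st) (List.replicate n 0, -1)
  |res.2 - ((n : Int) - res.2)|

-- ===== PORT B =====
-- one pop of B's while-loop body: scan j over range(n), mark and push fresh neighbours of i
def bStep (copied : List (List Int)) (i : Nat) (st : List Nat × List Bool) : List Nat × List Bool :=
  (List.range copied.length).foldl (fun st j =>
    if ((copied.getD i []).getD j 0 ≠ 0 ∧ st.2.getD j true = false) then
      (j :: st.1, st.2.set j true)
    else st) st

-- B's while-loop; `fuel` is only a totality guard (stack.length + #unvisited strictly decreases)
def bLoop (copied : List (List Int)) : Nat → List Nat → List Bool → Int → List Bool × Int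
  | _, [], visited, count => (visited, count)
  | 0, _ :: _, visited, count => (visited, count)
  | f+1, i :: rest, visited, count =>
    let st := bStep copied i (rest, visited)
    bLoop copied f st.1 st.2 (count + 1)

def search_alt (copied : List (List Int)) : Int :=
  let n := copied.length
  if n = 0 then 0
  else
    let res := bLoop copied n [0] ((List.replicate n false).set 0 true) 0
    |2 * res.2 - (n : Int)|

-- ===== PRECONDITION & SPEC =====
-- Pre_search excludes exactly the inputs on which Python A raises IndexError:
-- A's dfs reads copied[i][j] for every i and every j < len(copied), so every row
-- must have length >= len(copied).
def Pre_search (copied : List (List Int)) : Prop :=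
  ∀ row ∈ copied, copied.length ≤ row.length
instance (copied : List (List Int)) : Decidable (Pre_search copied) := by
  unfold Pre_search; infer_instance
def pvWitness_search : List (List Int) := [[0, 1], [1, 0]]

-- On the empty matrix [] A's loop never runs, the sentinel ret=-1 survives and A
-- returns abs(-1-1)=2; B returns 0, the intended size difference of two empty parts.
def D_search (copied : List (List Int)) : Prop := copied = []
instance (copied : List (List Int)) : Decidable (D_search copied) := by
  unfold D_search; infer_instance

def Spec_search (copied : List (List Int)) (out : Int) : Prop :=
  ¬ D_search copied → out = search_alt copied
instance (copied : List (List Int)) (out : Int) : Decidable (Spec_search copied out) := by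
  unfold Spec_search; infer_instance

def pvDiffWitness_search : List (List Int) := []
def pvDiffWitnessOut_search : Int × Int := (2, 0)

-- ===== CLAIM (what is proved, stated in full; the proofs are below) =====
def Claim_unchanged_search : Prop := ∀ (copied : List (List Int)), Dom_search copied → Pre_search copied → Spec_search copied (search copied)
def Claim_changed_search : Prop := Dom_search (pvDiffWitness_search) ∧ Pre_search (pvDiffWitness_search) ∧ D_search (pvDiffWitness_search) ∧ search (pvDiffWitness_search) = pvDiffWitnessOut_search.1 ∧ search_alt (pvDiffWitness_search) = pvDiffWitnessOut_search.2 ∧ pvDiffWitnessOut_search.1 ≠ pvDiffWitnessOut_search.2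
def Claim_exact_search : Prop := ∀ (copied : List (List Int)), Dom_search copied → Pre_search copied → D_search copied → search copied ≠ search_alt copied

-- ===== LEMMAS AND PROOFS =====

def pvStep (copied : List (List Int)) (a b : Nat) : Prop :=
  b < copied.length ∧ (copied.getD a []).getD b 0 ≠ 0
def mA (v : List Int) (k : Nat) : Prop := v.getD k 0 ≠ 0

theorem dfsA_unf0 (copied : List (List Int)) (i j : Nat) (v : List Int)
    (h : j < copied.length) (hc : (copied.getD i []).getD j 0 ≠ 0 ∧ v.getD j 0 = 0) :
    dfsA copied 0 i j v = v := by
  rw [dfsA, dif_pos h, if_pos hc]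

theorem dfsA_unfS (copied : List (List Int)) (f i j : Nat) (v : List Int)
    (h : j < copied.length) (hc : (copied.getD i []).getD j 0 ≠ 0 ∧ v.getD j 0 = 0) :
    dfsA copied (f+1) i j v = dfsA copied f i (j+1) (dfsA copied f j 0 (v.set j 1)) := by
  rw [dfsA, dif_pos h, if_pos hc]

theorem dfsA_unfE (copied : List (List Int)) (fuel i j : Nat) (v : List Int)
    (h : j < copied.length) (hc : ¬ ((copied.getD i []).getD j 0 ≠ 0 ∧ v.getD j 0 = 0)) :
    dfsA copied fuel i j v = dfsA copied fuel i (j+1) v := by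
  rw [dfsA.eq_def, dif_pos h, if_neg hc]

theorem dfsA_unfO (copied : List (List Int)) (fuel i j : Nat) (v : List Int)
    (h : ¬ j < copied.length) : dfsA copied fuel i j v = v := by
  rw [dfsA.eq_def, dif_neg h]

theorem getD_set_eq {α : Type} (v : List α) (j k : Nat) (x d : α) :
    (v.set j x).getD k d = if j = k ∧ j < v.length then x else v.getD k d := by
  simp only [List.getD_eq_getElem?_getD, List.getElem?_set]
  by_cases h1 : j = k
  · subst h1
    by_cases h2 : j < v.length <;> simp [h2]
  · simp [h1]

theorem getD_default_irrel {α : Type} (v : List α) (j : Nat) (h : j < v.length) (d d' : α) :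
    v.getD j d = v.getD j d' := by
  simp [List.getD_eq_getElem?_getD, List.getElem?_eq_getElem h]

theorem dfsA_length (copied : List (List Int)) (fuel i j : Nat) (v : List Int) :
    (dfsA copied fuel i j v).length = v.length := by
  induction fuel, i, j, v using dfsA.induct copied with
  | case1 i j v h hc => rw [dfsA_unf0 copied i j v h hc]
  | case2 i j v h hc f ih1 ih2 =>
      rw [dfsA_unfS copied f i j v h hc, ih2, ih1]; simp
  | case3 f i j v h hc ih => rw [dfsA_unfE _ _ _ _ _ h hc]; exact ih
  | case4 fuel i j v h => rw [dfsA_unfO _ _ _ _ _ h]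

theorem set_01 (v : List Int) (j : Nat)
    (h : ∀ k, v.getD k 0 = 0 ∨ v.getD k 0 = 1) :
    ∀ k, (v.set j 1).getD k 0 = 0 ∨ (v.set j 1).getD k 0 = 1 := by
  intro k; rw [getD_set_eq]; split_ifs <;> simp_all

theorem dfsA_mono (copied : List (List Int)) (fuel i j : Nat) (v : List Int) (k : Nat)
    (h : mA v k) : mA (dfsA copied fuel i j v) k := by
  induction fuel, i, j, v using dfsA.induct copied generalizing k with
  | case1 i j v hj hc => rw [dfsA_unf0 _ _ _ _ hj hc]; exact h
  | case2 i j v hj hc f ih1 ih2 =>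
      rw [dfsA_unfS _ _ _ _ _ hj hc]
      apply ih2; apply ih1
      unfold mA at *; rw [getD_set_eq]; split_ifs <;> simp_all
  | case3 f i j v hj hc ih => rw [dfsA_unfE _ _ _ _ _ hj hc]; exact ih _ h
  | case4 fuel i j v hj => rw [dfsA_unfO _ _ _ _ _ hj]; exact h

theorem dfsA_01 (copied : List (List Int)) (fuel i j : Nat) (v : List Int)
    (h : ∀ k, v.getD k 0 = 0 ∨ v.getD k 0 = 1) :
    ∀ k, (dfsA copied fuel i j v).getD k 0 = 0 ∨ (dfsA copied fuel i j v).getD k 0 = 1 := by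
  induction fuel, i, j, v using dfsA.induct copied with
  | case1 i j v hj hc => rw [dfsA_unf0 _ _ _ _ hj hc]; exact h
  | case2 i j v hj hc f ih1 ih2 =>
      rw [dfsA_unfS _ _ _ _ _ hj hc]
      exact ih2 (ih1 (set_01 v j h))
  | case3 f i j v hj hc ih => rw [dfsA_unfE _ _ _ _ _ hj hc]; exact ih h
  | case4 fuel i j v hj => rw [dfsA_unfO _ _ _ _ _ hj]; exact h

theorem dfsA_sound (copied : List (List Int)) (fuel i j : Nat) (v : List Int) (k : Nat)
    (h : mA (dfsA copied fuel i j v) k) :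
    mA v k ∨ Relation.ReflTransGen (pvStep copied) i k := by
  induction fuel, i, j, v using dfsA.induct copied generalizing k with
  | case1 i j v hj hc => rw [dfsA_unf0 _ _ _ _ hj hc] at h; exact Or.inl h
  | case2 i j v hj hc f ih1 ih2 =>
      rw [dfsA_unfS _ _ _ _ _ hj hc] at h
      rcases ih2 _ h with h1 | h1
      · rcases ih1 _ h1 with h2 | h2
        · unfold mA at h2; rw [getD_set_eq] at h2
          split_ifs at h2 with hjk
          · exact Or.inr (hjk.1 ▸ Relation.ReflTransGen.single ⟨hj, hc.1⟩)
          · exact Or.inl h2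
        · exact Or.inr (Relation.ReflTransGen.head ⟨hj, hc.1⟩ h2)
      · exact Or.inr h1
  | case3 f i j v hj hc ih => rw [dfsA_unfE _ _ _ _ _ hj hc] at h; exact ih _ h
  | case4 fuel i j v hj => rw [dfsA_unfO _ _ _ _ _ hj] at h; exact Or.inl h

def ZA (v : List Int) : Finset ℕ :=
  (Finset.range v.length).filter (fun k => v.getD k 0 = 0)

theorem ZA_set (v : List Int) (j : Nat) (hj : j < v.length) (_h0 : v.getD j 0 = 0) :
    ZA (v.set j 1) = (ZA v).erase j := by
  unfold ZA; ext k
  simp only [Finset.mem_filter, Finset.mem_erase, Finset.mem_range, List.length_set,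
    getD_set_eq]
  constructor
  · rintro ⟨hk, hv⟩
    split_ifs at hv with hjk
    · exact absurd hv (by norm_num)
    · exact ⟨fun hkj => hjk ⟨hkj.symm, hj⟩, hk, hv⟩
  · rintro ⟨hkj, hk, hv⟩
    refine ⟨hk, ?_⟩
    rw [if_neg (fun hh => hkj hh.1.symm)]
    exact hv

theorem ZA_mem (v : List Int) (j : Nat) (hj : j < v.length) (h0 : v.getD j 0 = 0) :
    j ∈ ZA v := by
  unfold ZA
  rw [Finset.mem_filter, Finset.mem_range]
  exact ⟨hj, h0⟩

theorem ZA_dfsA_le (copied : List (List Int)) (fuel i j : Nat) (v : List Int) :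
    (ZA (dfsA copied fuel i j v)).card ≤ (ZA v).card := by
  apply Finset.card_le_card
  intro k hk
  unfold ZA at *
  simp only [Finset.mem_filter, Finset.mem_range, dfsA_length] at *
  refine ⟨hk.1, ?_⟩
  by_contra hne
  exact (dfsA_mono copied fuel i j v k hne) hk.2

theorem dfsA_good (copied : List (List Int)) (fuel i j : Nat) (v : List Int) :
    v.length = copied.length → (ZA v).card ≤ fuel →
    ((∀ b, j ≤ b → pvStep copied i b → mA (dfsA copied fuel i j v) b) ∧
     (∀ a, mA (dfsA copied fuel i j v) a → ¬ mA v a →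
        ∀ b, pvStep copied a b → mA (dfsA copied fuel i j v) b)) := by
  induction fuel, i, j, v using dfsA.induct copied with
  | case1 i j v hj hc =>
      intro hlen hfuel
      exfalso
      have hm := ZA_mem v j (by omega) hc.2
      have := Finset.card_pos.mpr ⟨j, hm⟩
      omega
  | case2 i j v hj hc f ih1 ih2 =>
      intro hlen hfuel
      have hjv : j < v.length := by omega
      have hlen1 : (v.set j 1).length = copied.length := by simp [hlen]
      have hf1 : (ZA (v.set j 1)).card ≤ f := by
        rw [ZA_set v j hjv hc.2, Finset.card_erase_of_mem (ZA_mem v j hjv hc.2)]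
        have := Finset.card_pos.mpr ⟨j, ZA_mem v j hjv hc.2⟩
        omega
      have ih1' := ih1 hlen1 hf1
      have hlenw1 : (dfsA copied f j 0 (v.set j 1)).length = copied.length := by
        rw [dfsA_length]; exact hlen1
      have hf2 : (ZA (dfsA copied f j 0 (v.set j 1))).card ≤ f :=
        le_trans (ZA_dfsA_le copied f j 0 (v.set j 1)) hf1
      have ih2' := ih2 hlenw1 hf2
      rw [dfsA_unfS _ _ _ _ _ hj hc]
      have hmj : mA (dfsA copied f i (j+1) (dfsA copied f j 0 (v.set j 1))) j := by
        apply dfsA_mono; apply dfsA_mono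
        unfold mA; rw [getD_set_eq, if_pos ⟨rfl, hjv⟩]; norm_num
      constructor
      · intro b hjb hstep
        rcases Nat.eq_or_lt_of_le hjb with hb | hb
        · exact hb ▸ hmj
        · exact ih2'.1 b hb hstep
      · intro a ha hna b hstep
        by_cases h1 : mA (dfsA copied f j 0 (v.set j 1)) a
        · by_cases h2 : mA (v.set j 1) a
          · have haj : a = j := by
              unfold mA at h2 hna
              rw [getD_set_eq] at h2
              split_ifs at h2 with hjk
              · exact hjk.1.symm
              · exact absurd h2 (by simpa using hna)
            subst haj
            exact dfsA_mono _ _ _ _ _ _ (ih1'.1 b (Nat.zero_le b) hstep)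
          · exact dfsA_mono _ _ _ _ _ _ (ih1'.2 a h1 h2 b hstep)
        · exact ih2'.2 a ha h1 b hstep
  | case3 f i j v hj hc ih =>
      intro hlen hfuel
      rw [dfsA_unfE _ _ _ _ _ hj hc]
      have ih' := ih hlen hfuel
      constructor
      · intro b hjb hstep
        rcases Nat.eq_or_lt_of_le hjb with rfl | hb
        · have : mA v j := by
            unfold mA
            by_contra hz
            exact hc ⟨hstep.2, by simpa using hz⟩
          exact dfsA_mono _ _ _ _ _ _ this
        · exact ih'.1 b hb hstep
      · exact ih'.2
  | case4 fuel i j v hj =>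
      intro hlen hfuel
      rw [dfsA_unfO _ _ _ _ _ hj]
      constructor
      · intro b hjb hstep
        exact absurd hstep.1 (by omega)
      · intro a ha hna
        exact absurd ha hna

def pvR (copied : List (List Int)) (k : Nat) : Prop :=
  Relation.ReflTransGen (pvStep copied) 0 k

def MA (v : List Int) : Finset ℕ :=
  (Finset.range v.length).filter (fun k => v.getD k 0 ≠ 0)

def vA (copied : List (List Int)) : List Int :=
  dfsA copied copied.length 0 0 ((List.replicate copied.length 0).set 0 1)

theorem init01 (n : Nat) :
    ∀ k, ((List.replicate n (0:Int)).set 0 1).getD k 0 = 0 ∨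
         ((List.replicate n (0:Int)).set 0 1).getD k 0 = 1 := by
  intro k
  rw [getD_set_eq]
  split_ifs <;>
    simp [List.getD_eq_getElem?_getD, List.getElem?_getD_replicate_default_eq]

theorem mA_init (n : Nat) (hn : 0 < n) (k : Nat) :
    mA ((List.replicate n (0:Int)).set 0 1) k ↔ k = 0 := by
  unfold mA
  rw [getD_set_eq]
  split_ifs with h
  · simp only [List.length_replicate] at h
    simp [h.1.symm]
  · simp only [List.length_replicate] at h
    constructor
    · intro hne; exfalso; apply hne
      simp [List.getD_eq_getElem?_getD, List.getElem?_getD_replicate_default_eq]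
    · rintro rfl; exact absurd ⟨rfl, hn⟩ h

theorem vA_marked (copied : List (List Int)) (hn : 0 < copied.length) (k : Nat) :
    mA (vA copied) k ↔ pvR copied k := by
  have hlen0 : ((List.replicate copied.length (0:Int)).set 0 1).length = copied.length := by
    simp
  have hfuel : (ZA ((List.replicate copied.length (0:Int)).set 0 1)).card ≤ copied.length := by
    calc (ZA _).card ≤ (Finset.range ((List.replicate copied.length (0:Int)).set 0 1).length).card :=
          Finset.card_filter_le _ _
      _ = copied.length := by simp
  have hgood := dfsA_good copied copied.length 0 0 _ hlen0 hfuel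
  constructor
  · intro hm
    rcases dfsA_sound copied copied.length 0 0 _ k hm with h | h
    · rw [mA_init _ hn] at h
      exact h ▸ Relation.ReflTransGen.refl
    · exact h
  · intro hr
    induction hr with
    | refl =>
        exact dfsA_mono _ _ _ _ _ _ ((mA_init _ hn 0).mpr rfl)
    | tail hab hstep ih =>
        rename_i a' b'
        have hma : mA (vA copied) a' := ih
        by_cases h0 : a' = 0
        · exact hgood.1 b' (Nat.zero_le _) (h0 ▸ hstep)
        · have : ¬ mA ((List.replicate copied.length (0:Int)).set 0 1) a' := by
            rw [mA_init _ hn]; exact h0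
          exact hgood.2 a' hma this b' hstep

theorem countP_bridge (n : Nat) (p : Nat → Prop) [DecidablePred p] :
    ((Finset.range n).filter p).card = (List.range n).countP (fun k => decide (p k)) := by
  induction n with
  | zero => simp
  | succ n ih =>
      rw [Finset.range_add_one, List.range_succ, Finset.filter_insert, List.countP_append]
      split_ifs with h
      · rw [Finset.card_insert_of_notMem (by simp)]
        simp [ih, h]
      · simp [ih, h]

theorem sum01 (v : List Int) (h : ∀ k, v.getD k 0 = 0 ∨ v.getD k 0 = 1) :
    v.sum = (((List.range v.length).countP (fun k => decide (v.getD k 0 ≠ 0))) : ℤ) := by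
  induction v with
  | nil => simp
  | cons a v ih =>
      have ha := h 0
      simp only [List.getD_cons_zero] at ha
      have hv : ∀ k, v.getD k 0 = 0 ∨ v.getD k 0 = 1 := fun k => by
        have := h (k+1); simpa using this
      rw [List.sum_cons, ih hv, List.length_cons, List.range_succ_eq_map,
        List.countP_cons, List.countP_map]
      simp only [List.getD_cons_zero, Function.comp_def, List.getD_cons_succ]
      rcases ha with ha | ha <;> rw [ha] <;> simp <;> ring

theorem fold_ret {f : (List Int × Int) → Nat → (List Int × Int)}
    (hf : ∀ v r i, 0 ≤ r → (f (v, r) i).2 = r) :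
    ∀ (L : List Nat) (v : List Int) (r : Int), 0 ≤ r → (L.foldl f (v, r)).2 = r := by
  intro L
  induction L with
  | nil => intro v r _; rfl
  | cons i L ih =>
      intro v r hr
      rw [List.foldl_cons]
      rcases hE : f (v, r) i with ⟨v', r'⟩
      have h2 := hf v r i hr
      rw [hE] at h2
      simp only at h2
      subst h2
      exact ih v' _ hr

theorem vA_sum (copied : List (List Int)) :
    (vA copied).sum =
      (((List.range (vA copied).length).countP
        (fun k => decide ((vA copied).getD k 0 ≠ 0))) : ℤ) :=
  sum01 _ (dfsA_01 _ _ _ _ _ (init01 _))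

theorem vA_sum_nonneg (copied : List (List Int)) : 0 ≤ (vA copied).sum := by
  rw [vA_sum]; positivity

theorem search_eval (copied : List (List Int)) (hn : 0 < copied.length) :
    search copied = |(vA copied).sum - ((copied.length : ℤ) - (vA copied).sum)| := by
  obtain ⟨m, hm⟩ : ∃ m, copied.length = m + 1 := ⟨copied.length - 1, by omega⟩
  unfold search
  simp only []
  rw [hm, List.range_succ_eq_map, List.foldl_cons]
  have hcond : ((List.replicate (m+1) (0:Int)), (-1:Int)).1.getD 0 0 = 0 := by
    simp [List.getD_eq_getElem?_getD, List.getElem?_getD_replicate_default_eq]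
  rw [if_pos hcond]
  simp only [if_pos (by norm_num : (-1:Int) < 0)]
  have hfr : ∀ (v : List Int) (r : Int) (i : Nat), 0 ≤ r →
      ((fun (st : List Int × Int) i =>
        if st.1.getD i 0 = 0 then
          let visited := dfsA copied (m+1) i 0 (st.1.set i 1)
          (visited, if st.2 < 0 then visited.sum else st.2)
        else st) (v, r) i).2 = r := by
    intro v r i hr
    simp only
    split_ifs with h1 h2
    · omega
    · rfl
    · rfl
  rw [fold_ret hfr _ _ _ (by rw [← hm]; exact vA_sum_nonneg copied)]
  rw [← hm]
  rfl

def mB (v : List Bool) (k : Nat) : Prop := v.getD k false = true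
def MB (v : List Bool) : Finset ℕ :=
  (Finset.range v.length).filter (fun k => v.getD k false = true)
def ZB (v : List Bool) : Finset ℕ :=
  (Finset.range v.length).filter (fun k => v.getD k false = false)

theorem MB_mem (v : List Bool) (k : Nat) : k ∈ MB v ↔ k < v.length ∧ mB v k := by
  unfold MB mB; rw [Finset.mem_filter, Finset.mem_range]

theorem mB_set (v : List Bool) (j k : Nat) (hj : j < v.length) :
    mB (v.set j true) k ↔ k = j ∨ mB v k := by
  unfold mB; rw [getD_set_eq]
  split_ifs with h
  · simp [h.1.symm]
  · have : ¬ k = j := fun hk => h ⟨hk.symm, hj⟩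
    simp [this]

theorem mB_nd (v : List Bool) (j : Nat) (hj : j < v.length) :
    v.getD j true = v.getD j false :=
  getD_default_irrel v j hj _ _

theorem MB_set_insert (v : List Bool) (j : Nat) (hj : j < v.length) :
    MB (v.set j true) = insert j (MB v) := by
  ext k
  rw [Finset.mem_insert, MB_mem, MB_mem, mB_set v j k hj]
  simp only [List.length_set]
  constructor
  · rintro ⟨hk, h | h⟩
    · exact Or.inl h
    · exact Or.inr ⟨hk, h⟩
  · rintro (rfl | ⟨hk, h⟩)
    · exact ⟨hj, Or.inl rfl⟩
    · exact ⟨hk, Or.inr h⟩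

theorem MB_ZB_card (v : List Bool) : (MB v).card + (ZB v).card = v.length := by
  unfold MB ZB
  have : ∀ k, (v.getD k false = false) ↔ ¬ (v.getD k false = true) := by
    intro k; cases h : v.getD k false <;> simp
  rw [Finset.filter_congr (fun k _ => this k)]
  rw [Finset.filter_card_add_filter_neg_card_eq_card]
  exact Finset.card_range _

theorem bFold (copied : List (List Int)) (i : Nat) (L : List Nat) (hN : L.Nodup)
    (hLlt : ∀ j ∈ L, j < copied.length) :
    ∀ (s : List Nat) (v : List Bool), v.length = copied.length →
    ((L.foldl (fun (st : List Nat × List Bool) j =>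
        if ((copied.getD i []).getD j 0 ≠ 0 ∧ st.2.getD j true = false) then
          (j :: st.1, st.2.set j true) else st) (s, v)).2.length = copied.length ∧
     (∀ k, mB (L.foldl (fun (st : List Nat × List Bool) j =>
        if ((copied.getD i []).getD j 0 ≠ 0 ∧ st.2.getD j true = false) then
          (j :: st.1, st.2.set j true) else st) (s, v)).2 k ↔
        mB v k ∨ (k ∈ L ∧ (copied.getD i []).getD k 0 ≠ 0)) ∧
     (∀ a, a ∈ (L.foldl (fun (st : List Nat × List Bool) j =>
        if ((copied.getD i []).getD j 0 ≠ 0 ∧ st.2.getD j true = false) then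
          (j :: st.1, st.2.set j true) else st) (s, v)).1 ↔
        a ∈ s ∨ (a ∈ L ∧ (copied.getD i []).getD a 0 ≠ 0 ∧ ¬ mB v a)) ∧
     ((L.foldl (fun (st : List Nat × List Bool) j =>
        if ((copied.getD i []).getD j 0 ≠ 0 ∧ st.2.getD j true = false) then
          (j :: st.1, st.2.set j true) else st) (s, v)).1.length + (MB v).card =
        s.length + (MB (L.foldl (fun (st : List Nat × List Bool) j =>
        if ((copied.getD i []).getD j 0 ≠ 0 ∧ st.2.getD j true = false) then
          (j :: st.1, st.2.set j true) else st) (s, v)).2).card)) := by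
  induction L with
  | nil => intro s v hlen; exact ⟨hlen, by simp [List.not_mem_nil], by simp, rfl⟩
  | cons j L ih =>
      intro s v hlen
      have hjlt : j < copied.length := hLlt j (List.mem_cons_self ..)
      have hjv : j < v.length := by omega
      have hN' : L.Nodup := hN.of_cons
      have hLlt' : ∀ x ∈ L, x < copied.length := fun x hx => hLlt x (List.mem_cons_of_mem _ hx)
      rw [List.foldl_cons]
      by_cases hc : ((copied.getD i []).getD j 0 ≠ 0 ∧ v.getD j true = false)
      · rw [if_pos hc]
        have hnm : ¬ mB v j := by
          unfold mB; rw [← mB_nd v j hjv, hc.2]; simp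
        have hlen' : (v.set j true).length = copied.length := by simp [hlen]
        obtain ⟨g1, g2, g3, g4⟩ := ih hN' hLlt' (j :: s) (v.set j true) hlen'
        refine ⟨g1, ?_, ?_, ?_⟩
        · intro k
          rw [g2 k, mB_set v j k hjv, List.mem_cons]
          by_cases hkj : k = j
          · subst hkj
            have := hc.1
            tauto
          · tauto
        · intro a
          rw [g3 a, List.mem_cons, List.mem_cons]
          by_cases haj : a = j
          · subst haj
            have h1 := hc.1
            tauto
          · have h2 : mB (v.set j true) a ↔ mB v a := by
              rw [mB_set v j a hjv]; tauto
            rw [h2]; tauto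
        · rw [MB_set_insert v j hjv] at g4
          rw [Finset.card_insert_of_notMem (fun hm => hnm ((MB_mem v j).mp hm).2)] at g4
          simp only [List.length_cons] at g4
          generalize hW : (List.foldl (fun (st : List Nat × List Bool) j =>
            if ((copied.getD i []).getD j 0 ≠ 0 ∧ st.2.getD j true = false) then
              (j :: st.1, st.2.set j true) else st) (j :: s, v.set j true) L) = W at g4 ⊢
          omega
      · rw [if_neg hc]
        have hedge : (copied.getD i []).getD j 0 ≠ 0 → mB v j := by
          intro he
          unfold mB
          rw [← mB_nd v j hjv]
          by_contra hb
          exact hc ⟨he, by simpa using hb⟩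
        obtain ⟨g1, g2, g3, g4⟩ := ih hN' hLlt' s v hlen
        refine ⟨g1, ?_, ?_, g4⟩
        · intro k
          rw [g2 k, List.mem_cons]
          by_cases hkj : k = j
          · subst hkj; tauto
          · tauto
        · intro a
          rw [g3 a, List.mem_cons]
          by_cases haj : a = j
          · subst haj; tauto
          · tauto

theorem bStep_spec (copied : List (List Int)) (i : Nat) (s : List Nat) (v : List Bool)
    (hlen : v.length = copied.length) :
    ((bStep copied i (s, v)).2.length = copied.length ∧
     (∀ k, mB (bStep copied i (s, v)).2 k ↔
        mB v k ∨ (k < copied.length ∧ (copied.getD i []).getD k 0 ≠ 0)) ∧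
     (∀ a, a ∈ (bStep copied i (s, v)).1 ↔
        a ∈ s ∨ (a < copied.length ∧ (copied.getD i []).getD a 0 ≠ 0 ∧ ¬ mB v a)) ∧
     ((bStep copied i (s, v)).1.length + (MB v).card =
        s.length + (MB (bStep copied i (s, v)).2).card)) := by
  have h := bFold copied i (List.range copied.length) List.nodup_range
    (fun j hj => List.mem_range.mp hj) s v hlen
  simpa [bStep, List.mem_range] using h

theorem bLoop_nil (copied : List (List Int)) (f : Nat) (v : List Bool) (c : Int) :
    bLoop copied f [] v c = (v, c) := by cases f <;> rfl

theorem bLoop_zero (copied : List (List Int)) (s : List Nat) (v : List Bool) (c : Int) :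
    bLoop copied 0 s v c = (v, c) := by cases s <;> rfl

theorem bLoop_succ (copied : List (List Int)) (f i : Nat) (rest : List Nat)
    (v : List Bool) (c : Int) :
    bLoop copied (f+1) (i :: rest) v c =
      bLoop copied f (bStep copied i (rest, v)).1 (bStep copied i (rest, v)).2 (c + 1) := rfl

theorem bLoop_len (copied : List (List Int)) :
    ∀ (f : Nat) (s : List Nat) (v : List Bool) (c : Int), v.length = copied.length →
      (bLoop copied f s v c).1.length = copied.length := by
  intro f
  induction f with
  | zero => intro s v c hlen; rw [bLoop_zero]; exact hlen
  | succ f ih =>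
      intro s v c hlen
      cases s with
      | nil => rw [bLoop_nil]; exact hlen
      | cons i rest =>
          rw [bLoop_succ]
          exact ih _ _ _ (bStep_spec copied i rest v hlen).1

theorem bLoop_mono (copied : List (List Int)) :
    ∀ (f : Nat) (s : List Nat) (v : List Bool) (c : Int) (k : Nat),
      v.length = copied.length → mB v k → mB (bLoop copied f s v c).1 k := by
  intro f
  induction f with
  | zero => intro s v c k _ h; rw [bLoop_zero]; exact h
  | succ f ih =>
      intro s v c k hlen h
      cases s with
      | nil => rw [bLoop_nil]; exact h
      | cons i rest =>
          rw [bLoop_succ]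
          obtain ⟨g1, g2, _, _⟩ := bStep_spec copied i rest v hlen
          exact ih _ _ _ k g1 ((g2 k).mpr (Or.inl h))

theorem bLoop_sound (copied : List (List Int)) :
    ∀ (f : Nat) (s : List Nat) (v : List Bool) (c : Int),
      v.length = copied.length →
      (∀ a ∈ s, pvR copied a) → (∀ k, mB v k → pvR copied k) →
      ∀ k, mB (bLoop copied f s v c).1 k → pvR copied k := by
  intro f
  induction f with
  | zero => intro s v c _ _ hv k hk; rw [bLoop_zero] at hk; exact hv k hk
  | succ f ih =>
      intro s v c hlen hs hv k hk
      cases s with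
      | nil => rw [bLoop_nil] at hk; exact hv k hk
      | cons i rest =>
          rw [bLoop_succ] at hk
          obtain ⟨g1, g2, g3, _⟩ := bStep_spec copied i rest v hlen
          have hRi : pvR copied i := hs i (List.mem_cons_self ..)
          refine ih _ _ _ g1 ?_ ?_ k hk
          · intro a ha
            rcases (g3 a).mp ha with h | ⟨hlt, he, _⟩
            · exact hs a (List.mem_cons_of_mem _ h)
            · exact Relation.ReflTransGen.tail hRi ⟨hlt, he⟩
          · intro x hx
            rcases (g2 x).mp hx with h | ⟨hlt, he⟩
            · exact hv x h
            · exact Relation.ReflTransGen.tail hRi ⟨hlt, he⟩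

theorem bLoop_good (copied : List (List Int)) :
    ∀ (f : Nat) (s : List Nat) (v : List Bool) (c : Int),
      v.length = copied.length → s.length + (ZB v).card ≤ f →
      ((∀ a ∈ s, ∀ b, pvStep copied a b → mB (bLoop copied f s v c).1 b) ∧
       (∀ a, mB (bLoop copied f s v c).1 a → ¬ mB v a →
          ∀ b, pvStep copied a b → mB (bLoop copied f s v c).1 b) ∧
       ((bLoop copied f s v c).2 + ((MB v).card : ℤ) =
          c + s.length + ((MB (bLoop copied f s v c).1).card : ℤ))) := by
  intro f
  induction f with
  | zero =>
      intro s v c hlen hfuel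
      cases s with
      | nil =>
          rw [bLoop_nil]
          exact ⟨fun a ha => absurd ha (List.not_mem_nil),
                 fun a h1 h2 => absurd h1 h2,
                 by simp⟩
      | cons i rest => simp only [List.length_cons] at hfuel; omega
  | succ f ih =>
      intro s v c hlen hfuel
      cases s with
      | nil =>
          rw [bLoop_nil]
          exact ⟨fun a ha => absurd ha (List.not_mem_nil),
                 fun a h1 h2 => absurd h1 h2,
                 by simp⟩
      | cons i rest =>
          rw [bLoop_succ]
          obtain ⟨g1, g2, g3, g4⟩ := bStep_spec copied i rest v hlen
          have hz1 : (MB v).card + (ZB v).card = copied.length := hlen ▸ MB_ZB_card v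
          have hz2 : (MB (bStep copied i (rest, v)).2).card +
              (ZB (bStep copied i (rest, v)).2).card = copied.length := by
            rw [← g1]; exact MB_ZB_card _
          have hfuel' : (bStep copied i (rest, v)).1.length +
              (ZB (bStep copied i (rest, v)).2).card ≤ f := by
            simp only [List.length_cons] at hfuel
            omega
          obtain ⟨i1, i2, i3⟩ := ih (bStep copied i (rest, v)).1
            (bStep copied i (rest, v)).2 (c + 1) g1 hfuel'
          refine ⟨?_, ?_, ?_⟩
          · intro a ha b hb
            rcases List.mem_cons.mp ha with rfl | ha'
            · exact bLoop_mono copied f _ _ _ b g1 ((g2 b).mpr (Or.inr ⟨hb.1, hb.2⟩))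
            · exact i1 a ((g3 a).mpr (Or.inl ha')) b hb
          · intro a hm hnm b hb
            by_cases hm1 : mB (bStep copied i (rest, v)).2 a
            · rcases (g2 a).mp hm1 with h | ⟨hlt, he⟩
              · exact absurd h hnm
              · exact i1 a ((g3 a).mpr (Or.inr ⟨hlt, he, hnm⟩)) b hb
            · exact i2 a hm hm1 b hb
          · simp only [List.length_cons]
            have hcast : ((bStep copied i (rest, v)).1.length : ℤ) + ((MB v).card : ℤ)
                = (rest.length : ℤ) + ((MB (bStep copied i (rest, v)).2).card : ℤ) := by
              exact_mod_cast g4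
            push_cast at i3 ⊢
            linarith [i3, hcast]

def v0B (copied : List (List Int)) : List Bool :=
  (List.replicate copied.length false).set 0 true

def wB (copied : List (List Int)) : List Bool × Int :=
  bLoop copied copied.length [0] (v0B copied) 0

theorem v0B_len (copied : List (List Int)) : (v0B copied).length = copied.length := by
  unfold v0B; simp

theorem mB_init (copied : List (List Int)) (hn : 0 < copied.length) (k : Nat) :
    mB (v0B copied) k ↔ k = 0 := by
  unfold v0B mB
  rw [getD_set_eq]
  split_ifs with h
  · simp only [List.length_replicate] at h
    simp [h.1.symm]
  · simp only [List.length_replicate] at h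
    constructor
    · intro he; exfalso
      rw [List.getD_eq_getElem?_getD, List.getElem?_getD_replicate_default_eq] at he
      exact Bool.false_ne_true he
    · rintro rfl; exact absurd ⟨rfl, hn⟩ h

theorem MB_v0B (copied : List (List Int)) (hn : 0 < copied.length) :
    (MB (v0B copied)).card = 1 := by
  have : MB (v0B copied) = {0} := by
    ext k
    rw [MB_mem, Finset.mem_singleton, v0B_len, mB_init copied hn]
    constructor
    · exact fun h => h.2
    · rintro rfl; exact ⟨hn, rfl⟩
  rw [this, Finset.card_singleton]

theorem hfuelB (copied : List (List Int)) (hn : 0 < copied.length) :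
    [0].length + (ZB (v0B copied)).card ≤ copied.length := by
  have h1 := MB_ZB_card (v0B copied)
  rw [v0B_len, MB_v0B copied hn] at h1
  simp only [List.length_singleton]
  omega

theorem wB_marked (copied : List (List Int)) (hn : 0 < copied.length) (k : Nat) :
    mB (wB copied).1 k ↔ pvR copied k := by
  have hgood := bLoop_good copied copied.length [0] (v0B copied) 0
    (v0B_len copied) (hfuelB copied hn)
  constructor
  · intro hm
    refine bLoop_sound copied copied.length [0] (v0B copied) 0 (v0B_len copied) ?_ ?_ k hm
    · intro a ha
      rw [List.mem_singleton] at ha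
      exact ha ▸ Relation.ReflTransGen.refl
    · intro x hx
      rw [mB_init copied hn] at hx
      exact hx ▸ Relation.ReflTransGen.refl
  · intro hr
    induction hr with
    | refl =>
        exact bLoop_mono copied copied.length [0] (v0B copied) 0 0 (v0B_len copied)
          ((mB_init copied hn 0).mpr rfl)
    | tail hab hstep ih =>
        rename_i a' b'
        by_cases h0 : a' = 0
        · exact hgood.1 0 (List.mem_singleton_self 0) b' (h0 ▸ hstep)
        · have hna : ¬ mB (v0B copied) a' := by rw [mB_init copied hn]; exact h0
          exact hgood.2.1 a' ih hna b' hstep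

theorem wB_count (copied : List (List Int)) (hn : 0 < copied.length) :
    (wB copied).2 = ((MB (wB copied).1).card : ℤ) := by
  have h := (bLoop_good copied copied.length [0] (v0B copied) 0
    (v0B_len copied) (hfuelB copied hn)).2.2
  rw [MB_v0B copied hn] at h
  simp only [List.length_singleton] at h
  unfold wB
  push_cast at h ⊢
  linarith [h]

theorem search_alt_eval (copied : List (List Int)) (hn : 0 < copied.length) :
    search_alt copied = |2 * ((MB (wB copied).1).card : ℤ) - (copied.length : ℤ)| := by
  unfold search_alt
  simp only []
  rw [if_neg (by omega)]
  rw [show ((List.replicate copied.length false).set 0 true) = v0B copied from rfl]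
  rw [show bLoop copied copied.length [0] (v0B copied) 0 = wB copied from rfl]
  rw [wB_count copied hn]

theorem MA_mem (v : List Int) (k : Nat) : k ∈ MA v ↔ k < v.length ∧ mA v k := by
  unfold MA mA; rw [Finset.mem_filter, Finset.mem_range]

theorem vA_len (copied : List (List Int)) : (vA copied).length = copied.length := by
  unfold vA; rw [dfsA_length]; simp

theorem sA_card (copied : List (List Int)) :
    (vA copied).sum = ((MA (vA copied)).card : ℤ) := by
  rw [vA_sum, MA, countP_bridge]

theorem cards_eq (copied : List (List Int)) (hn : 0 < copied.length) :
    MA (vA copied) = MB (wB copied).1 := by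
  ext k
  rw [MA_mem, MB_mem, vA_len, show (wB copied).1.length = copied.length from
    bLoop_len copied copied.length [0] (v0B copied) 0 (v0B_len copied),
    vA_marked copied hn, wB_marked copied hn]

theorem main_eq (copied : List (List Int)) (hne : copied ≠ []) :
    search copied = search_alt copied := by
  have hn : 0 < copied.length := List.length_pos_of_ne_nil hne
  rw [search_eval copied hn, search_alt_eval copied hn, sA_card, cards_eq copied hn]
  congr 1
  ring

-- ===== VERDICT (by name: the statement is the Claim_ definition above) =====
theorem search_spec : Claim_unchanged_search := by
  intro copied _ _
  unfold Spec_search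
  intro hD
  unfold D_search at hD
  exact main_eq copied hD

theorem search_changed : Claim_changed_search := by
  unfold Claim_changed_search; decide

theorem search_tight : Claim_exact_search := by
  intro copied _ _ hD
  unfold D_search at hD
  subst hD
  decide
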